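-- pv_equiv track=rewrite | github.com/julian156asdfasdf/Project_Autocite | Data_Processing_Pipeline/step3_processing.py | infobbl_to_article_name
-- ===== SOURCE A (Python) =====
-- def infobbl_to_article_name(info: str) -> str:
--     '''
--     Finds the most likely title of the article from the info element of the bbl file
--
--     Arguments:
--         info: string of info from bbl file
--
--     Returns:
--         string: the most likely title of the article
--     '''
--
--     if not info:
--         return info
--     info_list = []
--     for poss_title in info.split(';'):
--         info_list.append(poss_title)
--
--     target = max(info_list, key = len)
--
--     return target
-- ===== SOURCE B (Python) =====
-- def infobbl_to_article_name(info: str) -> str: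
--     # One pass over the characters, no split(): keep the current segment and
--     # the best-so-far; update best only on strictly greater length so the
--     # earliest longest segment wins, exactly like max(..., key=len).
--     best = ""
--     cur = ""
--     for ch in info:
--         if ch == ';':
--             if len(cur) > len(best):
--                 best = cur
--             cur = ""
--         else:
--             cur += ch
--     return cur if len(cur) > len(best) else best
-- ===== Notes on version B (the rewrite author's own statement) =====
-- stated objective: alternative
-- what changed: Replaces split-on-semicolon plus max(key=len) with a single character-by-character scan that maintains the current segment and the best-so-far, updating only on strictly greater length; no intermediate list of segments is built.
import Mathlib
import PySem

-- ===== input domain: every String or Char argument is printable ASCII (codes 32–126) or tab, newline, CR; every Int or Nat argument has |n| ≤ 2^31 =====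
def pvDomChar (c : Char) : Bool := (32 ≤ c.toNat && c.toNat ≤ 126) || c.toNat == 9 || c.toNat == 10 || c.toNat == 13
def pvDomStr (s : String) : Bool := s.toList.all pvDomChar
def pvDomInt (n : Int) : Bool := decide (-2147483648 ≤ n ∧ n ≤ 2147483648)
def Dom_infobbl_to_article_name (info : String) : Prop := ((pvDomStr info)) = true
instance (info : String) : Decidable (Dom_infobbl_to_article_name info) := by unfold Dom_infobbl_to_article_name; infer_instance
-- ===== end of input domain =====

-- B replaces split(';') + max(key=len) by a single character scan keeping the current
-- segment and the best-so-far (strictly-greater updates preserve max's first-winner rule).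

-- ===== PORT A =====
def infobbl_to_article_name (info : String) : String :=
  if info = "" then info
  else
    -- info.split(';'): ';' ≠ '' so split? is always some; getD is never the default here
    let info_list := ((PySem.Str.split? info ";").getD []).foldl (fun acc t => acc ++ [t]) ([] : List String)
    -- max(info_list, key=len); info_list is nonempty, so the default "" is never returned
    PySem.List.maxD info_list PySem.Str.len ""

-- ===== PORT B =====
def pvAltLoop : List Char → List Char → List Char → List Char
  | [], cur, best => if cur.length > best.length then cur else best
  | c :: rest, cur, best =>
      if c = ';' then
        pvAltLoop rest [] (if cur.length > best.length then cur else best)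
      else pvAltLoop rest (cur ++ [c]) best

def infobbl_to_article_name_alt (info : String) : String :=
  String.ofList (pvAltLoop info.toList [] [])

-- ===== PRECONDITION & SPEC =====
def Spec_infobbl_to_article_name (info : String) (out : String) : Prop := out = infobbl_to_article_name_alt info
instance (info : String) (out : String) : Decidable (Spec_infobbl_to_article_name info out) := by unfold Spec_infobbl_to_article_name; infer_instance

-- ===== CLAIM (what is proved, stated in full; the proofs are below) =====
def Claim_equal_infobbl_to_article_name : Prop := ∀ (info : String), Dom_infobbl_to_article_name info → Spec_infobbl_to_article_name info (infobbl_to_article_name info)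

-- ===== LEMMAS AND PROOFS =====

-- segments of cs on ';' with cur prefixed to the first segment
def pvSegs : List Char → List Char → List (List Char)
  | cur, [] => [cur]
  | cur, c :: rest => if c = ';' then cur :: pvSegs [] rest else pvSegs (cur ++ [c]) rest

-- the strict-greater "best" step (max's first-winner rule on lengths)
def pvFmax (b s : List Char) : List Char := if b.length < s.length then s else b

theorem pvSegs_exists_cons (cur cs : List Char) : ∃ p ps, pvSegs cur cs = p :: ps := by
  induction cs generalizing cur with
  | nil => exact ⟨cur, [], rfl⟩
  | cons c rest ih =>
    by_cases h : c = ';'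
    · exact ⟨cur, pvSegs [] rest, by simp [pvSegs, h]⟩
    · obtain ⟨p, ps, hp⟩ := ih (cur ++ [c])
      exact ⟨p, ps, by simp [pvSegs, h, hp]⟩

theorem pvGo_eq : ∀ (fuel : Nat) (l cur : List Char) (acc : List (List Char)),
    l.length < fuel →
    PySem.Chars.splitOn.go [';'] fuel l cur acc = acc.reverse ++ pvSegs cur.reverse l := by
  intro fuel
  induction fuel with
  | zero => intro l cur acc h; omega
  | succ f ih =>
    intro l cur acc h
    cases l with
    | nil => simp [PySem.Chars.splitOn.go, pvSegs]
    | cons c rest =>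
      by_cases hc : c = ';'
      · subst hc
        rw [PySem.Chars.splitOn.go, if_pos (by simp [List.isPrefixOf])]
        have hd : List.drop [';'].length (';' :: rest) = rest := rfl
        rw [hd, ih rest [] (cur.reverse :: acc) (by simpa using Nat.lt_of_succ_lt_succ h)]
        simp [pvSegs]
      · rw [PySem.Chars.splitOn.go,
            if_neg (by simp [List.isPrefixOf]; exact fun hh => hc hh.symm)]
        rw [ih rest (c :: cur) acc (by simpa using Nat.lt_of_succ_lt_succ h)]
        simp [pvSegs, hc]

theorem pvAltLoop_eq (cs : List Char) : ∀ cur best,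
    pvAltLoop cs cur best = (pvSegs cur cs).foldl pvFmax best := by
  induction cs with
  | nil => intro cur best; simp [pvAltLoop, pvSegs, pvFmax]
  | cons c rest ih =>
    intro cur best
    by_cases h : c = ';'
    · simp [pvAltLoop, pvSegs, h, ih, pvFmax]
    · simp [pvAltLoop, pvSegs, h, ih]

theorem pvMaxCons {α κ : Type} [LT κ] [DecidableLT κ] (key : α → κ) :
    ∀ (qs : List α) (q : α), PySem.List.max? (q :: qs) key
      = some (qs.foldl (fun m x => if key m < key x then x else m) q) := by
  intro qs
  induction qs with
  | nil => intro q; rfl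
  | cons x xs ih =>
    intro q
    show PySem.List.max? (q :: x :: xs) key = _
    unfold PySem.List.max?
    simp only [List.foldl_cons]
    by_cases hx : key q < key x
    · simpa [PySem.List.max?, hx] using ih x
    · simpa [PySem.List.max?, hx] using ih q

theorem pvFoldl_toList (ps : List String) : ∀ (p : String),
    (ps.foldl (fun m x => if PySem.Str.len m < PySem.Str.len x then x else m) p).toList
      = (ps.map String.toList).foldl pvFmax p.toList := by
  induction ps with
  | nil => intro p; rfl
  | cons q qs ih =>
    intro p
    simp only [List.map, List.foldl]
    rw [ih]
    congr 1
    simp only [PySem.Str.len, pvFmax, Nat.cast_lt, apply_ite String.toList, String.length_toList]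

-- ===== VERDICT (by name: the statement is the Claim_ definition above) =====
theorem infobbl_to_article_name_spec : Claim_equal_infobbl_to_article_name := by
  intro info _
  unfold Spec_infobbl_to_article_name infobbl_to_article_name infobbl_to_article_name_alt
  by_cases h : info = ""
  · subst h; rfl
  · simp only [if_neg h]
    have hsegs : PySem.Chars.splitOn info.toList [';'] = pvSegs [] info.toList := by
      have := pvGo_eq (info.toList.length + 1) info.toList [] [] (by omega)
      simpa [PySem.Chars.splitOn] using this
    have hsplit := PySem.Str.split?_map info ";"
    have htl : (";" : String).toList = [';'] := by decide
    rw [htl, PySem.Chars.split?] at hsplit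
    simp only [List.isEmpty] at hsplit
    obtain ⟨L, hL, hmap⟩ := Option.map_eq_some_iff.mp hsplit
    obtain ⟨p, ps, hpp⟩ := pvSegs_exists_cons [] info.toList
    rw [hsegs, hpp] at hmap
    cases L with
    | nil => simp at hmap
    | cons q qs =>
      simp only [List.map_cons, List.cons.injEq] at hmap
      obtain ⟨hq, hqs⟩ := hmap
      rw [hL]
      simp only [Option.getD_some, PySem.List.foldl_append_singleton, List.nil_append]
      apply String.toList_inj.mp
      -- A side
      have hA : (PySem.List.maxD (q :: qs) PySem.Str.len "").toList
          = List.foldl pvFmax p ps := by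
        unfold PySem.List.maxD
        rw [pvMaxCons PySem.Str.len qs q]
        simp only [Option.getD_some]
        rw [pvFoldl_toList, hqs, hq]
      rw [hA]
      -- B side
      have hB : (String.ofList (pvAltLoop info.toList [] [])).toList
          = List.foldl pvFmax p ps := by
        simp only [String.toList_ofList]
        rw [pvAltLoop_eq, hpp]
        simp only [List.foldl]
        congr 1
        cases p <;> simp [pvFmax]
      rw [hB]
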